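-- pv_equiv track=rewrite | github.com/ITSMEsouptik/ad-intel-platform | backend/research/search_intent/cleaning.py | is_nav_intent
-- ===== SOURCE A (Python) =====
-- def is_nav_intent(query: str, brand_name: str = "") -> bool:
--     """
--     Check if query is navigational intent (just brand name / login).
--
--     Examples:
--     - "example-brand login" -> True
--     - "example-brand dubai" -> False
--     """
--     if not brand_name:
--         return False
--
--     query_lower = query.lower()
--     brand_lower = brand_name.lower()
--
--     # Check if query is just brand name with nav terms
--     nav_terms = ["login", "log in", "sign in", "sign up", "register", "app", "website", "site"]
--
--     for term in nav_terms:
--         if query_lower == f"{brand_lower} {term}" or query_lower == f"{term} {brand_lower}":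
--             return True
--
--     # Check if query is just the brand name
--     if query_lower == brand_lower:
--         return True
--
--     return False
-- ===== SOURCE B (Python) =====
-- NAV_TERMS = {"login", "log in", "sign in", "sign up", "register", "app", "website", "site"}
--
--
-- def is_nav_intent(query: str, brand_name: str = "") -> bool:
--     # Token-level: split both strings into words, strip the brand's word list
--     # off the front or back of the query's word list, and look the remaining
--     # words (re-joined) up in a set of nav terms.
--     if not brand_name:
--         return False
--     qw = query.lower().split(' ')
--     bw = brand_name.lower().split(' ')
--     if qw == bw:
--         return True
--     n = len(bw)
--     front = qw[:n] == bw and ' '.join(qw[n:]) in NAV_TERMS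
--     back = qw[-n:] == bw and ' '.join(qw[:-n]) in NAV_TERMS
--     return front or back
-- ===== Notes on version B (the rewrite author's own statement) =====
-- stated objective: alternative
-- what changed: B works at the token level: it splits query and brand into word lists, strips the brand's word list off the front or back of the query's word list by slice comparison, and looks the re-joined remaining words up in a set of nav terms, instead of A's loop that concatenates and compares both orderings of brand and term for every nav term.
import Mathlib
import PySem

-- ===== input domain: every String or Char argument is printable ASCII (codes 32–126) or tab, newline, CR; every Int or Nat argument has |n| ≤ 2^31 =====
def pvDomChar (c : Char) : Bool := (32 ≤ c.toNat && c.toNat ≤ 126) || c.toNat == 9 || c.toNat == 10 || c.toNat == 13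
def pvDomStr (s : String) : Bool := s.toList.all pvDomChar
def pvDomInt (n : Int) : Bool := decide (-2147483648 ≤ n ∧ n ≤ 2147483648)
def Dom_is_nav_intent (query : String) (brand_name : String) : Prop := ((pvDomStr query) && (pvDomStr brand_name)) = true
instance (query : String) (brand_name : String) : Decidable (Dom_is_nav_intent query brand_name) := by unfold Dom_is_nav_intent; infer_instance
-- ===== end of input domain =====

-- B re-implements the check at the TOKEN level: it splits query and brand into word
-- lists, strips the brand's word list off the front or back of the query's word list,
-- and looks the re-joined remainder up in a set of nav terms (alternative decomposition).


-- ===== PORT A =====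
def navTermsA : List String := ["login", "log in", "sign in", "sign up", "register", "app", "website", "site"]

def is_nav_intent (query : String) (brand_name : String) : Bool :=
  if brand_name == "" then false
  else
    let query_lower := PySem.Str.lower query
    let brand_lower := PySem.Str.lower brand_name
    -- the for-loop with early return, as an any over the nav_terms list
    if navTermsA.any (fun term =>
        query_lower == brand_lower ++ " " ++ term || query_lower == term ++ " " ++ brand_lower) then
      true
    else if query_lower == brand_lower then true
    else false

-- ===== PORT B =====
-- the Python set NAV_TERMS: a set of strings, held as their char lists (string equality = char-list equality)
def navSetB : List (List Char) :=
  ["login".toList, "log in".toList, "sign in".toList, "sign up".toList,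
   "register".toList, "app".toList, "website".toList, "site".toList]

def is_nav_intent_alt (query : String) (brand_name : String) : Bool :=
  if brand_name == "" then false
  else
    -- .lower().split(' ') — word lists of query and brand (exact: PySem.Chars.splitOn on code points)
    let qw := PySem.Chars.splitOn (PySem.Str.lower query).toList [' ']
    let bw := PySem.Chars.splitOn (PySem.Str.lower brand_name).toList [' ']
    if qw == bw then true
    else
      let n : Int := bw.length
      -- front = qw[:n] == bw and ' '.join(qw[n:]) in NAV_TERMS
      let front := (PySem.List.slice qw none (some n) == bw) &&
        navSetB.contains (PySem.Chars.join [' '] (PySem.List.slice qw (some n) none))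
      -- back = qw[-n:] == bw and ' '.join(qw[:-n]) in NAV_TERMS
      let back := (PySem.List.slice qw (some (-n)) none == bw) &&
        navSetB.contains (PySem.Chars.join [' '] (PySem.List.slice qw none (some (-n))))
      front || back

-- ===== PRECONDITION & SPEC =====
def Spec_is_nav_intent (query : String) (brand_name : String) (out : Bool) : Prop := out = is_nav_intent_alt query brand_name
instance (query : String) (brand_name : String) (out : Bool) : Decidable (Spec_is_nav_intent query brand_name out) := by unfold Spec_is_nav_intent; infer_instance

-- ===== CLAIM (what is proved, stated in full; the proofs are below) =====
def Claim_equal_is_nav_intent : Prop := ∀ (query : String) (brand_name : String), Dom_is_nav_intent query brand_name → Spec_is_nav_intent query brand_name (is_nav_intent query brand_name)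

-- ===== LEMMAS AND PROOFS =====

-- helper: (if X then true else if Y then true else false) = (if Y then true else X)
theorem ite_norm (X Y : Bool) :
    (if X = true then true else if Y = true then true else false) = (if Y = true then true else X) := by
  cases X <;> cases Y <;> simp

-- characterisation of PySem's split-on-a-single-char via Mathlib's List.splitOnP
theorem go_single (c : Char) : ∀ (fuel : Nat) (l cur : List Char) (acc : List (List Char)), l.length < fuel →
    PySem.Chars.splitOn.go [c] fuel l cur acc
      = acc.reverse ++ (l.splitOnP (· == c)).modifyHead (cur.reverse ++ ·) := by
  intro fuel
  induction fuel with
  | zero => intro l cur acc h; exact absurd h (Nat.not_lt_zero _)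
  | succ f ih =>
    intro l cur acc h
    cases l with
    | nil =>
      show (cur.reverse :: acc).reverse = _
      simp [List.splitOnP_nil]
    | cons x rest =>
      show (if [c].isPrefixOf (x :: rest) then
              PySem.Chars.splitOn.go [c] f (List.drop 1 (x :: rest)) [] (cur.reverse :: acc)
            else PySem.Chars.splitOn.go [c] f rest (x :: cur) acc) = _
      have hpre : [c].isPrefixOf (x :: rest) = (x == c) := by
        simp [List.isPrefixOf, eq_comm]
      rw [hpre, List.splitOnP_cons]
      by_cases hx : x = c
      · simp only [hx, beq_self_eq_true, if_true, List.drop_succ_cons, List.drop_zero]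
        rw [ih rest [] (cur.reverse :: acc) (by simpa using h)]
        rcases hsp : rest.splitOnP (· == c) with _ | ⟨h0, t0⟩
        · exact absurd hsp (List.splitOnP_ne_nil _ rest)
        · simp
      · have hx' : (x == c) = false := by simp [hx]
        simp only [hx', if_false, Bool.false_eq_true]
        rw [ih rest (x :: cur) acc (by simpa using h)]
        rcases hsp : rest.splitOnP (· == c) with _ | ⟨h0, t0⟩
        · exact absurd hsp (List.splitOnP_ne_nil _ rest)
        · simp

theorem splitOn_bridge (s : List Char) (c : Char) :
    PySem.Chars.splitOn s [c] = s.splitOnP (· == c) := by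
  show PySem.Chars.splitOn.go [c] (s.length + 1) s [] [] = _
  rw [go_single c (s.length + 1) s [] [] (by omega)]
  rcases hsp : s.splitOnP (· == c) with _ | ⟨h0, t0⟩
  · exact absurd hsp (List.splitOnP_ne_nil _ s)
  · simp

-- join of a cons with a nonempty tail
theorem join_cons_ne (a : List Char) (rest : List (List Char)) (h : rest ≠ []) :
    PySem.Chars.join [' '] (a :: rest) = a ++ ' ' :: PySem.Chars.join [' '] rest := by
  rcases rest with _ | ⟨b, t⟩
  · exact absurd rfl h
  · simp [PySem.Chars.join, List.intercalate]

-- join distributes over append of two nonempty token lists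
theorem join_append (l1 l2 : List (List Char)) (h1 : l1 ≠ []) (h2 : l2 ≠ []) :
    PySem.Chars.join [' '] (l1 ++ l2)
      = PySem.Chars.join [' '] l1 ++ ' ' :: PySem.Chars.join [' '] l2 := by
  induction l1 with
  | nil => exact absurd rfl h1
  | cons a t ih =>
    cases t with
    | nil =>
      rw [List.singleton_append, join_cons_ne a l2 h2]
      simp [PySem.Chars.join, List.intercalate]
    | cons a2 t2 =>
      have ihh := ih (by simp)
      rw [List.cons_append, join_cons_ne a ((a2 :: t2) ++ l2) (by simp),
          join_cons_ne a (a2 :: t2) (by simp), ihh]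
      simp

-- join inverts split
theorem join_splitOnP (l : List Char) :
    PySem.Chars.join [' '] (l.splitOnP (· == ' ')) = l := by
  have h := List.intercalate_splitOn (xs := l) ' '
  simpa [PySem.Chars.join, List.splitOn] using h

theorem front_iff (q b t : List Char) (ht : t ≠ []) :
    (q = b ++ ' ' :: t) ↔
      (List.take (b.splitOnP (· == ' ')).length (q.splitOnP (· == ' ')) = b.splitOnP (· == ' ') ∧
       PySem.Chars.join [' '] (List.drop (b.splitOnP (· == ' ')).length (q.splitOnP (· == ' '))) = t) := by
  constructor
  · rintro rfl
    have h := List.splitOnP_append_cons (· == ' ') b t ' ' (by simp)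
    rw [h]
    refine ⟨by simp, ?_⟩
    rw [List.drop_left]
    exact join_splitOnP t
  · rintro ⟨h1, h2⟩
    have hd : List.drop (b.splitOnP (· == ' ')).length (q.splitOnP (· == ' ')) ≠ [] := by
      intro h0
      rw [h0] at h2
      exact ht (by simpa [PySem.Chars.join, List.intercalate] using h2.symm)
    have hsplit : q.splitOnP (· == ' ')
        = b.splitOnP (· == ' ') ++ List.drop (b.splitOnP (· == ' ')).length (q.splitOnP (· == ' ')) := by
      conv_lhs => rw [← List.take_append_drop (b.splitOnP (· == ' ')).length (q.splitOnP (· == ' ')), h1]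
    have hj := join_splitOnP q
    rw [hsplit, join_append _ _ (List.splitOnP_ne_nil _ b) hd, h2, join_splitOnP b] at hj
    exact hj.symm

theorem back_iff (q b t : List Char) (ht : t ≠ []) :
    (q = t ++ ' ' :: b) ↔
      (List.drop ((q.splitOnP (· == ' ')).length - (b.splitOnP (· == ' ')).length) (q.splitOnP (· == ' ')) = b.splitOnP (· == ' ') ∧
       PySem.Chars.join [' '] (List.take ((q.splitOnP (· == ' ')).length - (b.splitOnP (· == ' ')).length) (q.splitOnP (· == ' '))) = t) := by
  constructor
  · rintro rfl
    have h := List.splitOnP_append_cons (· == ' ') t b ' ' (by simp)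
    rw [h]
    have hlen : (t.splitOnP (· == ' ') ++ b.splitOnP (· == ' ')).length - (b.splitOnP (· == ' ')).length
        = (t.splitOnP (· == ' ')).length := by simp
    rw [hlen, List.drop_left, List.take_left]
    exact ⟨rfl, join_splitOnP t⟩
  · rintro ⟨h1, h2⟩
    have hd : List.take ((q.splitOnP (· == ' ')).length - (b.splitOnP (· == ' ')).length) (q.splitOnP (· == ' ')) ≠ [] := by
      intro h0
      rw [h0] at h2
      exact ht (by simpa [PySem.Chars.join, List.intercalate] using h2.symm)
    have hsplit : q.splitOnP (· == ' ')
        = List.take ((q.splitOnP (· == ' ')).length - (b.splitOnP (· == ' ')).length) (q.splitOnP (· == ' ')) ++ b.splitOnP (· == ' ') := by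
      conv_lhs => rw [← List.take_append_drop ((q.splitOnP (· == ' ')).length - (b.splitOnP (· == ' ')).length) (q.splitOnP (· == ' ')), h1]
    have hj := join_splitOnP q
    rw [hsplit, join_append _ _ hd (List.splitOnP_ne_nil _ b), h2, join_splitOnP b] at hj
    exact hj.symm

theorem eq_iff_split (q b : List Char) :
    (q = b) ↔ q.splitOnP (· == ' ') = b.splitOnP (· == ' ') := by
  constructor
  · rintro rfl; rfl
  · intro h
    have hj := join_splitOnP q
    rw [h, join_splitOnP b] at hj
    exact hj.symm

-- abstract Bool identity used in the loop/membership correspondence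
theorem bool_merge (s e x1 x2 c1 c2 : Bool) :
    ((s && x1 || e && x2) || (s && c1 || e && c2)) = (s && (x1 || c1) || e && (x2 || c2)) := by
  cases s <;> cases e <;> cases x1 <;> cases x2 <;> cases c1 <;> cases c2 <;> decide

-- the loop over ANY (nonempty-term) list equals the two token-level strip-and-lookup tests
theorem any_eq (q b : List Char) (nav : List (List Char)) (hnav : ∀ t ∈ nav, t ≠ []) :
    (nav.any (fun t => decide (q = b ++ ' ' :: t) || decide (q = t ++ ' ' :: b)))
      = (((List.take (b.splitOnP (· == ' ')).length (q.splitOnP (· == ' ')) == b.splitOnP (· == ' ')) &&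
            nav.contains (PySem.Chars.join [' '] (List.drop (b.splitOnP (· == ' ')).length (q.splitOnP (· == ' '))))) ||
         ((List.drop ((q.splitOnP (· == ' ')).length - (b.splitOnP (· == ' ')).length) (q.splitOnP (· == ' ')) == b.splitOnP (· == ' ')) &&
            nav.contains (PySem.Chars.join [' '] (List.take ((q.splitOnP (· == ' ')).length - (b.splitOnP (· == ' ')).length) (q.splitOnP (· == ' ')))))) := by
  induction nav with
  | nil => simp
  | cons t rest ih =>
    have ht : t ≠ [] := hnav t List.mem_cons_self
    have hfront : decide (q = b ++ ' ' :: t)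
        = ((List.take (b.splitOnP (· == ' ')).length (q.splitOnP (· == ' ')) == b.splitOnP (· == ' ')) &&
           (PySem.Chars.join [' '] (List.drop (b.splitOnP (· == ' ')).length (q.splitOnP (· == ' '))) == t)) := by
      rw [Bool.eq_iff_iff]
      simp only [decide_eq_true_eq, Bool.and_eq_true, beq_iff_eq]
      exact front_iff q b t ht
    have hback : decide (q = t ++ ' ' :: b)
        = ((List.drop ((q.splitOnP (· == ' ')).length - (b.splitOnP (· == ' ')).length) (q.splitOnP (· == ' ')) == b.splitOnP (· == ' ')) &&
           (PySem.Chars.join [' '] (List.take ((q.splitOnP (· == ' ')).length - (b.splitOnP (· == ' ')).length) (q.splitOnP (· == ' '))) == t)) := by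
      rw [Bool.eq_iff_iff]
      simp only [decide_eq_true_eq, Bool.and_eq_true, beq_iff_eq]
      exact back_iff q b t ht
    simp only [List.any_cons, List.contains_cons]
    rw [hfront, hback, ih (fun x hx => hnav x (List.mem_cons_of_mem _ hx))]
    exact bool_merge _ _ _ _ _ _

-- ===== VERDICT (by name: the statement is the Claim_ definition above) =====
theorem is_nav_intent_spec : Claim_equal_is_nav_intent := by
  intro query brand_name _
  unfold Spec_is_nav_intent is_nav_intent is_nav_intent_alt
  by_cases hb : brand_name == ""
  · simp [hb]
  · simp only [hb, Bool.false_eq_true, if_false]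
    rw [splitOn_bridge ((PySem.Str.lower query).toList) ' ',
        splitOn_bridge ((PySem.Str.lower brand_name).toList) ' ']
    have hbpos : 0 < (((PySem.Str.lower brand_name).toList).splitOnP (· == ' ')).length :=
      List.length_pos_of_ne_nil (List.splitOnP_ne_nil _ _)
    rw [PySem.List.slice_to_natCast, PySem.List.slice_from_natCast,
        PySem.List.slice_from_neg_natCast _ _ hbpos, PySem.List.slice_to_neg_natCast _ _ hbpos]
    have hnav : ∀ t ∈ navSetB, t ≠ [] := by decide
    have hterm : ∀ t : String,
        ((PySem.Str.lower query == PySem.Str.lower brand_name ++ " " ++ t) ||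
         (PySem.Str.lower query == t ++ " " ++ PySem.Str.lower brand_name))
          = (decide ((PySem.Str.lower query).toList = (PySem.Str.lower brand_name).toList ++ ' ' :: t.toList) ||
             decide ((PySem.Str.lower query).toList = t.toList ++ ' ' :: (PySem.Str.lower brand_name).toList)) := by
      intro t
      have h1 : (PySem.Str.lower query == PySem.Str.lower brand_name ++ " " ++ t)
          = decide ((PySem.Str.lower query).toList = (PySem.Str.lower brand_name).toList ++ ' ' :: t.toList) := by
        rw [Bool.eq_iff_iff]
        simp only [beq_iff_eq, decide_eq_true_eq]
        rw [String.ext_iff]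
        constructor <;> intro h <;> simpa using h
      have h2 : (PySem.Str.lower query == t ++ " " ++ PySem.Str.lower brand_name)
          = decide ((PySem.Str.lower query).toList = t.toList ++ ' ' :: (PySem.Str.lower brand_name).toList) := by
        rw [Bool.eq_iff_iff]
        simp only [beq_iff_eq, decide_eq_true_eq]
        rw [String.ext_iff]
        constructor <;> intro h <;> simpa using h
      rw [h1, h2]
    have hA2 : navTermsA.any (fun term =>
          (PySem.Str.lower query == PySem.Str.lower brand_name ++ " " ++ term) ||
          (PySem.Str.lower query == term ++ " " ++ PySem.Str.lower brand_name))
        = navSetB.any (fun t =>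
            decide ((PySem.Str.lower query).toList = (PySem.Str.lower brand_name).toList ++ ' ' :: t) ||
            decide ((PySem.Str.lower query).toList = t ++ ' ' :: (PySem.Str.lower brand_name).toList)) := by
      rw [show navSetB = navTermsA.map String.toList from rfl, List.any_map]
      congr 1
      funext t
      exact hterm t
    have heq2 : (PySem.Str.lower query == PySem.Str.lower brand_name)
        = (((PySem.Str.lower query).toList.splitOnP (· == ' ')) == ((PySem.Str.lower brand_name).toList.splitOnP (· == ' '))) := by
      rw [Bool.eq_iff_iff]
      simp only [beq_iff_eq]
      rw [String.ext_iff]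
      exact eq_iff_split _ _
    rw [hA2, any_eq _ _ navSetB hnav, heq2]
    exact ite_norm _ _
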